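-- pv_equiv track=rewrite | github.com/folkemat/KoboPatchFan | loadDataThreadClass.py | findMore
-- ===== SOURCE A (Python) =====
-- def findMore(patch_name, lines):
--     #Search for the corresponding code for each patch name
--     i = 0
--     more_text = ""
--     while i < len(lines):
--         if patch_name in lines[i]:
--             for j in range(i+1, len(lines)):
--                 if lines[j].startswith(' ') or lines[j].startswith('#') or len(lines[j].strip()) == 0: #A new patch block starts without spaces etc.
--                     more_text += lines[j]
--                 else:
--                     break
--         i += 1
--     return more_text
-- ===== SOURCE B (Python) =====
-- def _is_continuation(line):
--     return line.startswith(' ') or line.startswith('#') or len(line.strip()) == 0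
--
--
-- def findMore(patch_name, lines):
--     # One backward pass builds a block-boundary table: block_end[k] is the first
--     # index >= k holding a non-continuation line (or len(lines)); the forward
--     # pass then slices each match's block out by table lookup.
--     n = len(lines)
--     block_end = [0] * (n + 1)
--     block_end[n] = n
--     for k in range(n - 1, -1, -1):
--         block_end[k] = block_end[k + 1] if _is_continuation(lines[k]) else k
--     more_text = ""
--     for i, line in enumerate(lines):
--         if patch_name in line:
--             more_text += ''.join(lines[i + 1:block_end[i + 1]])
--     return more_text
-- ===== Notes on version B (the rewrite author's own statement) =====
-- stated objective: alternative
-- what changed: Replaces A's per-match forward rescan of the continuation block by a single backward pass that precomputes a block-end table, then a forward pass that slices each match's block out by table lookup.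
import Mathlib
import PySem

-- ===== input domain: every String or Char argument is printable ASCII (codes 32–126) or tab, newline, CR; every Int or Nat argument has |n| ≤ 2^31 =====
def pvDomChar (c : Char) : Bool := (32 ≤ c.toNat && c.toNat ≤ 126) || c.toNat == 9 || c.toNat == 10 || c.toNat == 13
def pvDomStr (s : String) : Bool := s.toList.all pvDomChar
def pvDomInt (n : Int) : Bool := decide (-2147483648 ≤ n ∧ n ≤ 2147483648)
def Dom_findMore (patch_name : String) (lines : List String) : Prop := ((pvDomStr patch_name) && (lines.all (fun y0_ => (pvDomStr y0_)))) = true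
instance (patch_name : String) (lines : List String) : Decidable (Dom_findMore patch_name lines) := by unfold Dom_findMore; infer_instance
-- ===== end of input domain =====

-- B replaces A's per-match forward rescan by a precomputed block-end table (one backward pass)
-- plus one forward pass slicing each match's block by table lookup; return values proved equal on all inputs.

-- ===== PORT A =====
-- the inline continuation test of A's inner loop
def pvContA (s : String) : Bool :=
  PySem.Str.startswith s " " || PySem.Str.startswith s "#" || PySem.Str.len (PySem.Str.strip s) == 0

-- A's inner 'for j in range(i+1, len(lines))' with break: scan of the suffix after position i
def pvInnerA : List String → String
  | [] => ""
  | x :: xs => if pvContA x then x ++ pvInnerA xs else ""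

-- A's outer 'while i < len(lines)' scan; the accumulator concatenates in i order
def pvOuterA (patch_name : String) : List String → String
  | [] => ""
  | x :: xs => (if PySem.Str.isIn patch_name x then pvInnerA xs else "") ++ pvOuterA patch_name xs

def findMore (patch_name : String) (lines : List String) : String :=
  pvOuterA patch_name lines

-- ===== PORT B =====
def pvContB (s : String) : Bool :=
  PySem.Str.startswith s " " || PySem.Str.startswith s "#" || PySem.Str.len (PySem.Str.strip s) == 0

-- the backward table-building loop: entry for absolute position k, given the suffix lines[k:]
def pvBeTable (k : Nat) : List String → List Nat
  | [] => [k]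
  | x :: xs =>
    let rest := pvBeTable (k + 1) xs
    (if pvContB x then rest.headD 0 else k) :: rest

-- 'for i, line in enumerate(lines)' starting at index k
def pvEnumFrom (k : Nat) : List String → List (Nat × String)
  | [] => []
  | x :: xs => (k, x) :: pvEnumFrom (k + 1) xs

def findMore_alt (patch_name : String) (lines : List String) : String :=
  let table := pvBeTable 0 lines
  (pvEnumFrom 0 lines).foldl
    (fun acc p =>
      if PySem.Str.isIn patch_name p.2 then
        acc ++ PySem.Str.join "" (PySem.List.slice lines (some ((p.1 : Int) + 1)) (some ((table.getD (p.1 + 1) 0 : Nat) : Int)))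
      else acc)
    ""

-- ===== PRECONDITION & SPEC =====
def Spec_findMore (patch_name : String) (lines : List String) (out : String) : Prop := out = findMore_alt patch_name lines
instance (patch_name : String) (lines : List String) (out : String) : Decidable (Spec_findMore patch_name lines out) := by unfold Spec_findMore; infer_instance

-- ===== CLAIM (what is proved, stated in full; the proofs are below) =====
def Claim_equal_findMore : Prop := ∀ (patch_name : String) (lines : List String), Dom_findMore patch_name lines → Spec_findMore patch_name lines (findMore patch_name lines)

-- ===== LEMMAS AND PROOFS =====

-- length of the maximal continuation prefix
def pvReach : List String → Nat
  | [] => 0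
  | x :: xs => if pvContB x then pvReach xs + 1 else 0

theorem pvJoin_nil : PySem.Str.join "" ([] : List String) = "" := by decide

theorem pvJoin_cons (a : String) (rest : List String) :
    PySem.Str.join "" (a :: rest) = a ++ PySem.Str.join "" rest := by
  cases rest with
  | nil =>
    apply String.toList_injective
    simp [PySem.Str.toList_join, PySem.Chars.join, List.intercalate]
  | cons b t =>
    apply String.toList_injective
    simp [PySem.Str.toList_join, PySem.Chars.join_cons_cons]

-- A's inner scan equals the join of the continuation prefix
theorem pvInnerA_eq (ls : List String) :
    pvInnerA ls = PySem.Str.join "" (ls.take (pvReach ls)) := by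
  induction ls with
  | nil => simp [pvInnerA, pvReach, pvJoin_nil]
  | cons x xs ih =>
    by_cases h : pvContA x = true
    · have h' : pvContB x = true := h
      simp [pvInnerA, pvReach, h, h', List.take_succ_cons, pvJoin_cons, ih]
    · have h' : pvContB x = false := by simpa [pvContA, pvContB] using h
      simp [pvInnerA, pvReach, h, h', pvJoin_nil]

-- the table entry at offset j is (absolute position) + reach of the suffix there
theorem pvBeTable_getD (ls : List String) :
    ∀ (k j : Nat), j ≤ ls.length →
      (pvBeTable k ls).getD j 0 = k + j + pvReach (ls.drop j) := by
  induction ls with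
  | nil =>
    intro k j hj
    have hj0 : j = 0 := Nat.le_zero.mp (by simpa using hj)
    subst hj0
    simp [pvBeTable, pvReach]
  | cons x xs ih =>
    intro k j hj
    have hhead : ∀ (l : List Nat), l.headD 0 = l.getD 0 0 := by
      intro l; cases l <;> simp
    cases j with
    | zero =>
      by_cases h : pvContB x = true
      · simp only [pvBeTable, List.getD_cons_zero, h, if_true]
        rw [hhead, ih (k + 1) 0 (Nat.zero_le _)]
        simp [pvReach, h]
        omega
      · simp [pvBeTable, h, pvReach]
    | succ j' =>
      have hj' : j' ≤ xs.length := by simpa using hj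
      simp only [pvBeTable, List.getD_cons_succ, List.drop_succ_cons]
      rw [ih (k + 1) j' hj']
      omega

-- the forward pass from position k, given the suffix there, equals A's outer scan of that suffix
theorem pvForward_eq (patch_name : String) (lines : List String) :
    ∀ (s : List String) (k : Nat) (acc : String), lines.drop k = s →
      (pvEnumFrom k s).foldl
        (fun acc p =>
          if PySem.Str.isIn patch_name p.2 then
            acc ++ PySem.Str.join "" (PySem.List.slice lines (some ((p.1 : Int) + 1)) (some (((pvBeTable 0 lines).getD (p.1 + 1) 0 : Nat) : Int)))
          else acc)
        acc
      = acc ++ pvOuterA patch_name s := by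
  intro s
  induction s with
  | nil => intro k acc _; simp [pvEnumFrom, pvOuterA]
  | cons x xs ih =>
    intro k acc hk
    have hlen : k < lines.length := by
      by_contra h
      rw [List.drop_eq_nil_of_le (by omega)] at hk
      simp at hk
    have hdrop : lines.drop (k + 1) = xs := by
      have h1 : (lines.drop k).drop 1 = lines.drop (k + 1) := by
        rw [List.drop_drop]
      rw [← h1, hk]
      rfl
    have htab : (pvBeTable 0 lines).getD (k + 1) 0 = (k + 1) + pvReach xs := by
      rw [pvBeTable_getD lines 0 (k + 1) (by omega), hdrop]
      omega
    have hslice :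
        PySem.List.slice lines (some ((k : Int) + 1)) (some (((pvBeTable 0 lines).getD (k + 1) 0 : Nat) : Int))
          = xs.take (pvReach xs) := by
      rw [htab]
      have hc : ((k : Int) + 1) = ((k + 1 : Nat) : Int) := by push_cast; ring
      rw [hc, PySem.List.slice_natCast, hdrop]
      congr 1
      omega
    simp only [pvEnumFrom, List.foldl_cons]
    rw [ih (k + 1) _ hdrop]
    by_cases h : PySem.Str.isIn patch_name x = true
    · rw [if_pos h]
      show acc ++ _ ++ pvOuterA patch_name xs = acc ++ pvOuterA patch_name (x :: xs)
      rw [hslice]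
      simp only [pvOuterA, if_pos h]
      rw [pvInnerA_eq, String.append_assoc]
    · rw [if_neg h]
      simp only [pvOuterA, if_neg h]
      simp

-- ===== VERDICT (by name: the statement is the Claim_ definition above) =====
theorem findMore_spec : Claim_equal_findMore := by
  intro patch_name lines _
  unfold Spec_findMore findMore findMore_alt
  rw [pvForward_eq patch_name lines lines 0 "" (by simp)]
  simp
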